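-- pv_equiv track=rewrite | github.com/rahulnm-13/Recommendation_System | Recommend_Systems.py | new_cat1
-- ===== SOURCE A (Python) =====
-- def new_cat1(string):
--     ctr = 0
--     size = 0
--     for i in range(len(string)):
--         if(ctr==8):
--             break
--         if(string[i]=='>'):
--             ctr += 1
--         size += 1
--     return size-3
-- ===== SOURCE B (Python) =====
-- def new_cat1(string):
--     parts = string.split('>')
--     if len(parts) <= 8:
--         return len(string) - 3
--     return sum(len(p) for p in parts[:8]) + 8 - 3
-- ===== Notes on version B (the rewrite author's own statement) =====
-- stated objective: faster
-- what changed: Replaces the char-by-char counting loop with a single split on the delimiter, computing the answer from the lengths of the first 8 segments (or the string length when fewer than 8 delimiters exist).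
import Mathlib
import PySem

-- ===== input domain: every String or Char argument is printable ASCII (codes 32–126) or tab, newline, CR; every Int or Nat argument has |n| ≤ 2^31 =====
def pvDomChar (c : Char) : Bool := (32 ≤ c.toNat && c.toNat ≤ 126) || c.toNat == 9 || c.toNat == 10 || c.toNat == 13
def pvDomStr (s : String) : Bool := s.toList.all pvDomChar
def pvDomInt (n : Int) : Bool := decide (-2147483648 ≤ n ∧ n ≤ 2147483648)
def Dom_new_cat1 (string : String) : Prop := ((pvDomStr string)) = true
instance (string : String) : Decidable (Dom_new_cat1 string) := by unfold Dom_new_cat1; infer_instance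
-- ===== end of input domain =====

-- B computes the same value by splitting the string on '>' once instead of an early-exit counting scan (objective: alternative).


-- ===== PORT A =====
-- the for-loop of A with its early break: state (ctr, size), one step per character
def newCat1Loop : List Char → Nat → Nat → Nat
  | [], _, size => size
  | c :: rest, ctr, size =>
    if ctr = 8 then size
    else newCat1Loop rest (if c = '>' then ctr + 1 else ctr) (size + 1)

def new_cat1 (string : String) : Int := (newCat1Loop string.toList 0 0 : Int) - 3

-- ===== PORT B =====
-- string.split('>'): sep ">" is nonempty so PySem.Str.split? always returns some; .getD [] only unwraps it
def new_cat1_alt (string : String) : Int :=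
  let parts := (PySem.Str.split? string ">").getD []
  if parts.length ≤ 8 then PySem.Str.len string - 3
  else ((parts.take 8).map PySem.Str.len).sum + 8 - 3

-- ===== PRECONDITION & SPEC =====
def Spec_new_cat1 (string : String) (out : Int) : Prop := out = new_cat1_alt string
instance (string : String) (out : Int) : Decidable (Spec_new_cat1 string out) := by unfold Spec_new_cat1; infer_instance

-- ===== CLAIM (what is proved, stated in full; the proofs are below) =====
def Claim_equal_new_cat1 : Prop := ∀ (string : String), Dom_new_cat1 string → Spec_new_cat1 string (new_cat1 string)

-- ===== LEMMAS AND PROOFS =====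

-- reference split of a char list on '>'
def sSplit : List Char → List (List Char)
  | [] => [[]]
  | c :: rest => if c = '>' then [] :: sSplit rest else (sSplit rest).modifyHead (c :: ·)

theorem sSplit_ne_nil (l : List Char) : sSplit l ≠ [] := by
  induction l with
  | nil => simp [sSplit]
  | cons c rest ih =>
    simp only [sSplit]
    split
    · simp
    · cases h : sSplit rest
      · exact absurd h ih
      · simp [List.modifyHead]

theorem go_spec (fuel : Nat) (l cur : List Char) (acc : List (List Char))
    (h : l.length < fuel) :
    PySem.Chars.splitOn.go ['>'] fuel l cur acc
      = acc.reverse ++ (sSplit l).modifyHead (cur.reverse ++ ·) := by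
  induction fuel generalizing l cur acc with
  | zero => omega
  | succ fuel ih =>
    cases l with
    | nil =>
      simp [PySem.Chars.splitOn.go, sSplit, List.modifyHead]
    | cons c rest =>
      by_cases hc : c = '>'
      · subst hc
        rw [show PySem.Chars.splitOn.go ['>'] (fuel + 1) ('>' :: rest) cur acc
              = PySem.Chars.splitOn.go ['>'] fuel rest [] (cur.reverse :: acc) from by
            rw [PySem.Chars.splitOn.go]
            simp [List.isPrefixOf]]
        rw [ih rest [] (cur.reverse :: acc) (by simpa using Nat.lt_of_succ_lt_succ h)]
        simp only [sSplit, List.reverse_cons, List.reverse_nil, List.nil_append,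
          List.append_assoc]
        cases sSplit rest <;> simp [List.modifyHead]
      · rw [show PySem.Chars.splitOn.go ['>'] (fuel + 1) (c :: rest) cur acc
              = PySem.Chars.splitOn.go ['>'] fuel rest (c :: cur) acc from by
            rw [PySem.Chars.splitOn.go]
            rw [if_neg (by simp [List.isPrefixOf]; exact fun h => hc h.symm)]]
        rw [ih rest (c :: cur) acc (by simpa using Nat.lt_of_succ_lt_succ h)]
        simp only [sSplit, if_neg hc]
        congr 1
        cases hs : sSplit rest with
        | nil => exact absurd hs (sSplit_ne_nil rest)
        | cons p ps => simp [List.modifyHead]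

theorem splitOn_eq_sSplit (l : List Char) :
    PySem.Chars.splitOn l ['>'] = sSplit l := by
  unfold PySem.Chars.splitOn
  rw [go_spec (l.length + 1) l [] [] (by omega)]
  simp
  cases hs : sSplit l with
  | nil => exact absurd hs (sSplit_ne_nil l)
  | cons p ps => simp [List.modifyHead]

-- the value A's loop adds: length of the prefix through the k-th '>' (whole length if fewer)
def fPref : List Char → Nat → Nat
  | _, 0 => 0
  | [], _ + 1 => 0
  | c :: rest, k + 1 => 1 + fPref rest (if c = '>' then k else k + 1)

theorem loop_eq_fPref (l : List Char) : ∀ (ctr size : Nat), ctr ≤ 8 →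
    newCat1Loop l ctr size = size + fPref l (8 - ctr) := by
  induction l with
  | nil => intro ctr size _; cases h : 8 - ctr <;> simp [newCat1Loop, fPref]
  | cons c rest ih =>
    intro ctr size hctr
    by_cases h8 : ctr = 8
    · subst h8; simp [newCat1Loop, fPref]
    · have hk : 8 - ctr = (8 - (ctr + 1)) + 1 := by omega
      rw [newCat1Loop, if_neg h8, hk]
      by_cases hc : c = '>'
      · rw [if_pos hc, ih (ctr + 1) (size + 1) (by omega)]
        simp [fPref, hc]; omega
      · rw [if_neg hc, ih ctr (size + 1) hctr]
        simp only [fPref, if_neg hc]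
        have : 8 - (ctr + 1) + 1 = 8 - ctr := by omega
        rw [this]; omega

theorem fPref_eq_sSplit (l : List Char) : ∀ (k : Nat), 1 ≤ k →
    fPref l k = if (sSplit l).length ≤ k then l.length
                else (((sSplit l).take k).map List.length).sum + k := by
  induction l with
  | nil =>
    intro k hk
    cases k with
    | zero => omega
    | succ k =>
      simp only [fPref, sSplit, List.length_cons, List.length_nil]
      rw [if_pos (by omega)]
  | cons c rest ih =>
    intro k hk
    obtain ⟨k', rfl⟩ : ∃ k', k = k' + 1 := ⟨k - 1, by omega⟩
    by_cases hc : c = '>'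
    · subst hc
      have e1 : fPref ('>' :: rest) (k' + 1) = 1 + fPref rest k' := by simp [fPref]
      have e2 : sSplit ('>' :: rest) = [] :: sSplit rest := by simp [sSplit]
      rw [e1, e2]
      have hpos : 0 < (sSplit rest).length :=
        List.length_pos_iff.mpr (sSplit_ne_nil rest)
      cases k' with
      | zero =>
        rw [if_neg (by simp only [List.length_cons]; omega)]
        simp [fPref]
      | succ k'' =>
        rw [ih (k'' + 1) (by omega)]
        simp only [List.length_cons, List.take_succ_cons, List.map_cons, List.sum_cons,
          List.length_nil]
        split_ifs with h1 h2 h2 <;> omega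
    · simp only [fPref, sSplit, if_neg hc]
      rw [ih (k' + 1) (by omega)]
      have hl : ((sSplit rest).modifyHead (c :: ·)).length = (sSplit rest).length := by
        simp
      rw [hl]
      split_ifs with h1
      · simp only [List.length_cons]; omega
      · have hne := sSplit_ne_nil rest
        cases hs : sSplit rest with
        | nil => exact absurd hs hne
        | cons p ps =>
          simp only [List.modifyHead, List.take_succ_cons, List.map_cons, List.sum_cons,
            List.length_cons]
          omega

theorem split?_some (s : String) :
    ∃ parts, PySem.Str.split? s ">" = some parts ∧ parts.map String.toList = sSplit s.toList := by
  have h := PySem.Str.split?_map s ">"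
  rw [show (">" : String).toList = ['>'] from rfl] at h
  rw [show PySem.Chars.split? s.toList ['>'] = some (PySem.Chars.splitOn s.toList ['>']) from by
    simp [PySem.Chars.split?]] at h
  cases hs : PySem.Str.split? s ">" with
  | none => rw [hs] at h; simp at h
  | some parts =>
    rw [hs] at h
    simp only [Option.map_some, Option.some.injEq] at h
    exact ⟨parts, rfl, by rw [h, splitOn_eq_sSplit]⟩

-- ===== VERDICT (by name: the statement is the Claim_ definition above) =====
theorem new_cat1_spec : Claim_equal_new_cat1 := by
  intro s _
  unfold Spec_new_cat1 new_cat1 new_cat1_alt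
  obtain ⟨parts, hsp, hmap⟩ := split?_some s
  rw [hsp]
  simp only [Option.getD_some]
  rw [loop_eq_fPref s.toList 0 0 (by omega)]
  rw [fPref_eq_sSplit s.toList 8 (by omega)]
  have hlen : parts.length = (sSplit s.toList).length := by
    rw [← hmap, List.length_map]
  have hsum : ∀ (n : Nat) (ps : List String),
      ((ps.take n).map PySem.Str.len).sum
        = (((ps.map String.toList).take n).map List.length).sum := by
    intro n ps
    induction ps generalizing n with
    | nil => simp
    | cons p ps ih =>
      cases n with
      | zero => simp
      | succ n =>
        simp only [List.take_succ_cons, List.map_cons, List.sum_cons, ih n,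
          PySem.Str.len]
        push_cast
        ring
  rw [hlen]
  split_ifs with h
  · simp [PySem.Str.len]
  · rw [hsum 8 parts, hmap]
    push_cast
    omega
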